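-- pv_equiv track=rewrite | github.com/agarithm/2019_AOC | 01.py | filler
-- ===== SOURCE A (Python) =====
-- def filler(mass):
--     fuel = 0;
--     if int(mass) <= 0:
--         return 0
--     else:
--         fuel = int(mass)//3-2
--         if fuel < 0:
--             return 0
--         else:
--             return fuel + filler(fuel)
-- ===== SOURCE B (Python) =====
-- def filler(mass):
--     # Stage 1: materialise the list of successive fuel amounts.
--     chunks = []
--     m = int(mass)
--     while m > 0:
--         f = m // 3 - 2
--         if f < 0:
--             break
--         chunks.append(f)
--         m = f
--     # Stage 2: sum them.
--     return sum(chunks)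
-- ===== Notes on version B (the rewrite author's own statement) =====
-- stated objective: alternative
-- what changed: Replaces A's single recursive accumulation (fuel + filler(fuel)) with two staged passes: a loop that materialises the list of successive fuel amounts, then a sum() over that list.
import Mathlib
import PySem

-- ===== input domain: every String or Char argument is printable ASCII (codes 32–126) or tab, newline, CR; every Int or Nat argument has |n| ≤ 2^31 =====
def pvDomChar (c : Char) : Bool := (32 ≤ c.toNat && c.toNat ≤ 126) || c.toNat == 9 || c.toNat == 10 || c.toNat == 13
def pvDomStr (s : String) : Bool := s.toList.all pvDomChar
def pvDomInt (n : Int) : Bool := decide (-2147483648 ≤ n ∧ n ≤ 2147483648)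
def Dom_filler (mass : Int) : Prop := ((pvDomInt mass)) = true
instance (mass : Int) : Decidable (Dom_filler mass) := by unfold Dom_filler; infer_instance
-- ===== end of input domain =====

-- B builds the list of successive fuel amounts in one pass and sums it in a second; return value only.


-- ===== PORT A =====
-- literal port of A's recursion: guard mass ≤ 0, fuel = mass//3-2, guard fuel < 0, else fuel + filler fuel
def filler (mass : Int) : Int :=
  if mass ≤ 0 then 0
  else
    let fuel := PySem.Int.floordiv mass 3 - 2
    if fuel < 0 then 0
    else fuel + filler fuel
termination_by mass.toNat
decreasing_by
  rename_i h1 h2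
  have h3 : PySem.Int.floordiv mass 3 = mass / 3 := PySem.Int.floordiv_eq_ediv_of_pos (by omega)
  simp only [h3] at *
  omega

-- ===== PORT B =====
-- stage 1 of Source B: the while-loop that collects each fuel amount into a list
def fillerChunks (m : Int) : List Int :=
  if hm : m > 0 then
    let f := PySem.Int.floordiv m 3 - 2
    if f < 0 then []
    else f :: fillerChunks f
  else []
termination_by m.toNat
decreasing_by
  rename_i hf
  have h3 : PySem.Int.floordiv m 3 = m / 3 := PySem.Int.floordiv_eq_ediv_of_pos (by omega)
  simp only [h3] at *
  omega

-- stage 2 of Source B: sum(chunks) — Python's sum is a left fold from 0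
def filler_alt (mass : Int) : Int := (fillerChunks mass).foldl (· + ·) 0

-- ===== PRECONDITION & SPEC =====
def Spec_filler (mass : Int) (out : Int) : Prop := out = filler_alt mass
instance (mass : Int) (out : Int) : Decidable (Spec_filler mass out) := by unfold Spec_filler; infer_instance

-- ===== CLAIM (what is proved, stated in full; the proofs are below) =====
def Claim_equal_filler : Prop := ∀ (mass : Int), Dom_filler mass → Spec_filler mass (filler mass)

-- ===== LEMMAS AND PROOFS =====
theorem foldl_add_shift (l : List Int) (a : Int) :
    l.foldl (· + ·) a = a + l.foldl (· + ·) 0 := by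
  induction l generalizing a with
  | nil => simp
  | cons x xs ih => simp only [List.foldl]; rw [ih (a + x), ih (0 + x)]; ring

theorem chunks_sum_eq (m : Int) : (fillerChunks m).foldl (· + ·) 0 = filler m := by
  induction m using fillerChunks.induct with
  | case1 m hm f hf =>
      rw [fillerChunks, filler]
      simp only [dif_pos hm, if_neg (not_le.mpr hm)]
      rw [if_pos hf, if_pos hf]
      rfl
  | case2 m hm f hf ih =>
      rw [fillerChunks, filler]
      simp only [dif_pos hm, if_neg (not_le.mpr hm)]
      rw [if_neg hf, if_neg hf, List.foldl, foldl_add_shift, ih]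
      ring
  | case3 m hm =>
      rw [fillerChunks, filler]
      simp only [dif_neg hm, if_pos (not_lt.mp hm), List.foldl]

-- ===== VERDICT (by name: the statement is the Claim_ definition above) =====
theorem filler_spec : Claim_equal_filler := by
  intro mass _
  unfold Spec_filler filler_alt
  rw [chunks_sum_eq]
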